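-- pv_equiv track=rewrite | github.com/FranzDiebold/project-euler-solutions | src/common/calculations.py | calculate_large_sum
-- ===== SOURCE A (Python) =====
-- from typing import Iterable
--
-- def calculate_large_sum(number_strings: Iterable[str]) -> str:
--     """Calculate sum of large numbers.
--
--     Args:
--         number_strings: iterable of numbers as strings to sum up.
--     Returns:
--         The sum of the numbers as string.
--     """
--     number_strings = list(number_strings)
--     large_sum = ''
--     new_digit = True
--     digit_idx = 1
--     remainder = 0
--     while new_digit:
--         new_digit = False
--         current_sum_digit = remainder
--         for number in number_strings:
--             try:
--                 digit = int(number[-digit_idx])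
--                 new_digit = True
--             except IndexError:
--                 digit = 0
--             current_sum_digit += digit
--         large_sum = str(current_sum_digit % 10) + large_sum
--         remainder = current_sum_digit // 10
--         digit_idx += 1
--     if remainder:
--         large_sum = str(remainder) + large_sum
--
--     return large_sum.lstrip('0') or '0'
-- ===== SOURCE B (Python) =====
-- def calculate_large_sum(number_strings):
--     """Calculate sum of large numbers given as digit strings."""
--     total = 0
--     for s in number_strings:
--         value = 0
--         for ch in s:
--             value = value * 10 + int(ch)
--         total += value
--     return str(total)
-- ===== Notes on version B (the rewrite author's own statement) =====
-- stated objective: alternative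
-- what changed: Replaces A's schoolbook column-by-column addition with carry propagation and string assembly by evaluating each number via Horner's rule into an integer, summing the integers with ordinary integer arithmetic, and converting the total to a string once.
import Mathlib
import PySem

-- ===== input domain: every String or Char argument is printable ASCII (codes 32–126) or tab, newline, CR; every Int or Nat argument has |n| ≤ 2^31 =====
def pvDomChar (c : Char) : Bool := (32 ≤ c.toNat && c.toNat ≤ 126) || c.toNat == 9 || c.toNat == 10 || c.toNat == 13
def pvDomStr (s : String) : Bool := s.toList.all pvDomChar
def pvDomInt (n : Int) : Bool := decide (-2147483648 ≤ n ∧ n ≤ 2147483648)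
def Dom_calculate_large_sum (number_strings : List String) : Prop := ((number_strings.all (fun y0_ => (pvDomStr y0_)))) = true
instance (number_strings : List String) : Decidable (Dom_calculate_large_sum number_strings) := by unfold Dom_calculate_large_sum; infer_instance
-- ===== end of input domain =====

-- B replaces A's column-by-column schoolbook addition (carry propagation, string assembly)
-- by evaluating each number with Horner's rule into an integer, summing the integers, and
-- converting the total to a string once. Return-value equivalence on Pre_ (digit-only strings).

-- ===== PORT A =====

-- int(c) for a single digit character; exact on '0'..'9' (Pre_ admits only digit strings)
def pvDigitInt (c : Char) : Int := (c.toNat : Int) - 48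

-- helper for the termination measure of the while-loop (max length of the strings)
def pvMaxLen (ns : List String) : Nat := ns.foldr (fun s m => max s.toList.length m) 0

-- body of `for number in number_strings` accumulating (current_sum_digit, new_digit)
def pvColStep (digit_idx : Nat) (p : Int × Bool) (number : String) : Int × Bool :=
  match PySem.Str.pyGet? number (-(digit_idx : Int)) with
  | some c => (p.1 + pvDigitInt c, true)      -- digit = int(number[-digit_idx]); new_digit = True
  | none => (p.1 + 0, p.2)                    -- except IndexError: digit = 0

theorem pvColStep_le_maxLen (ns : List String) (i : Nat) (r : Int) (b : Bool)
    (h : (ns.foldl (pvColStep i) (r, b)).2 = true) :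
    b = true ∨ i ≤ pvMaxLen ns := by
  induction ns generalizing r b with
  | nil => exact Or.inl h
  | cons s t ih =>
    simp only [List.foldl_cons] at h
    have hstep : pvMaxLen (s :: t) = max s.toList.length (pvMaxLen t) := rfl
    rcases ih _ _ h with hb | hi
    · rcases hget : PySem.Str.pyGet? s (-(i : Int)) with _ | c
      · simp only [hget] at hb
        exact Or.inl hb
      · right
        have hsome : PySem.List.pyGet? s.toList (-(i : Int)) = some c := by simpa using hget
        have hne : PySem.List.pyGet? s.toList (-(i : Int)) ≠ none := by simp [hsome]
        rw [Ne, PySem.List.pyGet?_eq_none_iff, not_not] at hne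
        simp only [PySem.Raise.InRange] at hne
        omega
    · right; omega

-- for number in number_strings: accumulate (current_sum_digit, new_digit) from (remainder, False)
def pvColFold (ns : List String) (digit_idx : Nat) (remainder : Int) : Int × Bool :=
  ns.foldl (pvColStep digit_idx) (remainder, false)

-- the `while new_digit:` loop (digit_idx, remainder, large_sum are the loop state)
def pvLoopA (ns : List String) (digit_idx : Nat) (remainder : Int) (large_sum : List Char) :
    List Char :=
  let current := (pvColFold ns digit_idx remainder).1
  let large_sum' := PySem.Int.toChars (PySem.Int.mod current 10) ++ large_sum
  let remainder' := PySem.Int.floordiv current 10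
  if h : (pvColFold ns digit_idx remainder).2 = true then
    pvLoopA ns (digit_idx + 1) remainder' large_sum'
  else if remainder' ≠ 0 then PySem.Int.toChars remainder' ++ large_sum' else large_sum'
  termination_by pvMaxLen ns + 1 - digit_idx
  decreasing_by
    rcases pvColStep_le_maxLen ns digit_idx remainder false h with hb | hi
    · simp at hb
    · omega

def calculate_large_sum (number_strings : List String) : String :=
  let large_sum := pvLoopA number_strings 1 0 []
  -- large_sum.lstrip('0') or '0' : dropWhile on chars is exact for a single-char lstrip
  let stripped := large_sum.dropWhile (fun c => c == '0')
  String.ofList (if stripped.isEmpty then ['0'] else stripped)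

-- ===== PORT B =====

-- inner loop `for ch in s: value = value * 10 + int(ch)` (Horner's rule)
def pvHorner (s : String) : Int := s.toList.foldl (fun value ch => value * 10 + pvDigitInt ch) 0

def calculate_large_sum_alt (number_strings : List String) : String :=
  let total := number_strings.foldl (fun total s => total + pvHorner s) 0  -- total += value
  PySem.Int.toStr total                                                    -- str(total)

-- ===== PRECONDITION & SPEC =====
-- Pre_ excludes inputs containing a non-digit character, on which A raises ValueError
-- (int() of a non-digit character); B raises ValueError there too.
def Pre_calculate_large_sum (number_strings : List String) : Prop :=
  (number_strings.all (fun s => s.toList.all PySem.Chars.isdigit)) = true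
instance (number_strings : List String) : Decidable (Pre_calculate_large_sum number_strings) := by
  unfold Pre_calculate_large_sum; infer_instance

def pvWitness_calculate_large_sum : List String := ["12", "9", ""]

def Spec_calculate_large_sum (number_strings : List String) (out : String) : Prop :=
  out = calculate_large_sum_alt number_strings
instance (number_strings : List String) (out : String) :
    Decidable (Spec_calculate_large_sum number_strings out) := by
  unfold Spec_calculate_large_sum; infer_instance

-- ===== CLAIM (what is proved, stated in full; the proofs are below) =====
def Claim_equal_calculate_large_sum : Prop :=
  ∀ (number_strings : List String), Dom_calculate_large_sum number_strings →
    Pre_calculate_large_sum number_strings →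
    Spec_calculate_large_sum number_strings (calculate_large_sum number_strings)

-- ===== LEMMAS AND PROOFS =====

-- digit of s at position j from the right, '0'-filled (A's virtual column entry)
def pvDigAt (s : String) (j : Nat) : Int := pvDigitInt (s.toList.reverse.getD j '0')

-- column sum at position j from the right
def pvS (ns : List String) (j : Nat) : Int := (ns.map (fun s => pvDigAt s j)).sum

-- abstract carry chain of A: processes one sum per step, then A's extra final iteration
def pvChainA : List Int → Int → List Char → List Char
  | [], r, acc =>
      (if PySem.Int.floordiv r 10 ≠ 0 then PySem.Int.toChars (PySem.Int.floordiv r 10) else []) ++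
        PySem.Int.toChars (PySem.Int.mod r 10) ++ acc
  | s :: rest, r, acc =>
      pvChainA rest (PySem.Int.floordiv (r + s) 10) (PySem.Int.toChars (PySem.Int.mod (r + s) 10) ++ acc)

-- the number a list of column sums denotes: sums[0] + 10*sums[1] + …
def pvNum : List Int → Int
  | [] => 0
  | s :: rest => s + 10 * pvNum rest

-- ---- A-side characterization ----

theorem pvDigitInt_zeroChar : pvDigitInt '0' = 0 := by decide

-- one pass of the inner for-loop equals "add the column sum; did any string have this index?"
theorem pvColFold_spec (ns : List String) (i : Nat) (r : Int) (b : Bool) (hi : 1 ≤ i) :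
    ns.foldl (pvColStep i) (r, b) =
      (r + pvS ns (i - 1), b || ns.any (fun s => decide (i ≤ s.toList.length))) := by
  induction ns generalizing r b with
  | nil => simp [pvS]
  | cons s t ih =>
    simp only [List.foldl_cons, List.any_cons]
    have hstep : pvColStep i (r, b) s =
        (r + pvDigAt s (i - 1), b || decide (i ≤ s.toList.length)) := by
      unfold pvColStep
      rcases hget : PySem.Str.pyGet? s (-(i : Int)) with _ | c
      · have hnone : PySem.List.pyGet? s.toList (-(i : Int)) = none := by simpa using hget
        rw [PySem.List.pyGet?_eq_none_iff] at hnone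
        simp only [PySem.Raise.InRange] at hnone
        have hlen : s.toList.length < i := by omega
        have hd : pvDigAt s (i - 1) = 0 := by
          unfold pvDigAt
          rw [List.getD_eq_default _ _ (by simp only [List.length_reverse]; omega)]
          exact pvDigitInt_zeroChar
        have hb2 : decide (i ≤ s.toList.length) = false := decide_eq_false (by omega)
        rw [hd, hb2, Bool.or_false, add_zero]
      · have hsome : PySem.List.pyGet? s.toList (-(i : Int)) = some c := by simpa using hget
        have hne : PySem.List.pyGet? s.toList (-(i : Int)) ≠ none := by simp [hsome]
        rw [Ne, PySem.List.pyGet?_eq_none_iff, not_not] at hne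
        simp only [PySem.Raise.InRange] at hne
        have hlen : i ≤ s.toList.length := by omega
        rw [PySem.List.pyGet?_neg_natCast s.toList i hi hlen] at hsome
        have hlt : s.toList.length - i < s.toList.length := by omega
        have hc : c = s.toList[s.toList.length - i] := by
          rw [List.getElem?_eq_getElem hlt] at hsome
          exact (Option.some_injective _ hsome).symm
        have hrev : pvDigAt s (i - 1) = pvDigitInt c := by
          unfold pvDigAt
          have h1 : i - 1 < s.toList.reverse.length := by
            simp only [List.length_reverse]; omega
          rw [List.getD_eq_getElem _ _ h1, List.getElem_reverse, hc]
          congr 2; omega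
        have hb2 : decide (i ≤ s.toList.length) = true := decide_eq_true hlen
        rw [hrev, hb2, Bool.or_true]
    rw [hstep, ih _ _]
    have hsum : pvS (s :: t) (i - 1) = pvDigAt s (i - 1) + pvS t (i - 1) := by simp [pvS]
    rw [hsum]
    congr 1
    · ring
    · simp [Bool.or_assoc]

theorem pvAny_eq (ns : List String) (i : Nat) (hi : 1 ≤ i) :
    ns.any (fun s => decide (i ≤ s.toList.length)) = decide (i ≤ pvMaxLen ns) := by
  induction ns with
  | nil =>
    have : decide (i ≤ pvMaxLen []) = false := decide_eq_false (by unfold pvMaxLen; simp; omega)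
    simp [this]
  | cons s t ih =>
    have hstep : pvMaxLen (s :: t) = max s.toList.length (pvMaxLen t) := rfl
    simp only [List.any_cons, ih, hstep]
    rw [show decide (i ≤ max s.toList.length (pvMaxLen t)) =
        decide (i ≤ s.toList.length ∨ i ≤ pvMaxLen t) from decide_eq_decide.mpr le_max_iff,
      Bool.decide_or]

theorem pvLen_le_maxLen (ns : List String) (s : String) (hs : s ∈ ns) :
    s.toList.length ≤ pvMaxLen ns := by
  induction ns with
  | nil => simp at hs
  | cons a t ih =>
    have hstep : pvMaxLen (a :: t) = max a.toList.length (pvMaxLen t) := rfl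
    rw [List.mem_cons] at hs
    rcases hs with rfl | hs
    · omega
    · have := ih hs
      omega

theorem pvS_zero_of_maxLen_le (ns : List String) (j : Nat) (h : pvMaxLen ns ≤ j) :
    pvS ns j = 0 := by
  apply List.sum_eq_zero
  intro x hx
  rw [List.mem_map] at hx
  obtain ⟨s, hs, rfl⟩ := hx
  have hlen : s.toList.length ≤ pvMaxLen ns := pvLen_le_maxLen ns s hs
  unfold pvDigAt
  rw [List.getD_eq_default]
  · exact pvDigitInt_zeroChar
  · simp only [List.length_reverse]; omega

-- the while-loop equals the abstract carry chain over the remaining column sums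
theorem pvLoopA_eq (ns : List String) :
    ∀ (n i : Nat) (r : Int) (acc : List Char), 1 ≤ i → pvMaxLen ns + 1 - i = n →
      pvLoopA ns i r acc =
        pvChainA ((List.range n).map (fun t => pvS ns (i - 1 + t))) r acc := by
  intro n
  induction n with
  | zero =>
    intro i r acc hi hn
    rw [pvLoopA]
    have hfold := pvColFold_spec ns i r false hi
    have hKlt : pvMaxLen ns < i := by omega
    have hany : ns.any (fun s => decide (i ≤ s.toList.length)) = false := by
      rw [pvAny_eq ns i hi]; simp; omega
    have hS : pvS ns (i - 1) = 0 := pvS_zero_of_maxLen_le ns (i - 1) (by omega)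
    unfold pvColFold
    rw [hfold, hS, hany]
    simp only [List.range_zero, List.map_nil, pvChainA, add_zero, Bool.false_or]
    split_ifs <;> simp_all
  | succ n ihn =>
    intro i r acc hi hn
    rw [pvLoopA]
    have hfold := pvColFold_spec ns i r false hi
    have hile : i ≤ pvMaxLen ns := by omega
    have hany : ns.any (fun s => decide (i ≤ s.toList.length)) = true := by
      rw [pvAny_eq ns i hi]; simp; omega
    unfold pvColFold
    rw [hfold, hany]
    simp only [Bool.false_or, dite_true]
    rw [ihn (i + 1) _ _ (by omega) (by omega)]
    simp only [Nat.add_sub_cancel]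
    rw [List.range_succ_eq_map, List.map_cons, List.map_map]
    simp only [pvChainA, add_zero]
    have hl : (List.range n).map (fun t => pvS ns (i + t)) =
        (List.range n).map ((fun t => pvS ns (i - 1 + t)) ∘ Nat.succ) :=
      List.map_congr_left (fun t _ => by simp only [Function.comp_apply]; congr 1; omega)
    rw [hl]

theorem pvA_value (ns : List String) :
    calculate_large_sum ns =
      String.ofList
        (if ((pvChainA ((List.range (pvMaxLen ns)).map (pvS ns)) 0 []).dropWhile
            (fun c => c == '0')).isEmpty
         then ['0']
         else (pvChainA ((List.range (pvMaxLen ns)).map (pvS ns)) 0 []).dropWhile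
            (fun c => c == '0')) := by
  unfold calculate_large_sum
  rw [pvLoopA_eq ns (pvMaxLen ns) 1 0 [] (by omega) (by omega)]
  simp

-- ---- decimal representation facts ----

theorem pvToDigitsCore_append : ∀ (f n : Nat) (l : List Char),
    Nat.toDigitsCore 10 f n l = Nat.toDigitsCore 10 f n [] ++ l := by
  intro f
  induction f with
  | zero => intro n l; simp [Nat.toDigitsCore]
  | succ f ih =>
    intro n l
    simp only [Nat.toDigitsCore]
    by_cases h : n / 10 = 0
    · simp [h]
    · simp only [h, if_false]
      rw [ih (n / 10) _, ih (n / 10) [Nat.digitChar (n % 10)]]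
      simp

theorem pvToDigitsCore_fuel (n : Nat) : ∀ (f f' : Nat), n < f → n < f' →
    Nat.toDigitsCore 10 f n [] = Nat.toDigitsCore 10 f' n [] := by
  induction n using Nat.strong_induction_on with
  | _ n ih =>
    intro f f' hf hf'
    obtain ⟨a, rfl⟩ : ∃ a, f = a + 1 := ⟨f - 1, by omega⟩
    obtain ⟨b, rfl⟩ : ∃ b, f' = b + 1 := ⟨f' - 1, by omega⟩
    simp only [Nat.toDigitsCore]
    by_cases h : n / 10 = 0
    · simp [h]
    · simp only [h, if_false]
      rw [pvToDigitsCore_append a (n / 10) _, pvToDigitsCore_append b (n / 10) _]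
      have hlt : n / 10 < n := Nat.div_lt_self (by omega) (by norm_num)
      rw [ih (n / 10) hlt a b (by omega) (by omega)]

theorem pvToDigits_split (m : Nat) (h : 10 ≤ m) :
    Nat.toDigits 10 m = Nat.toDigits 10 (m / 10) ++ Nat.toDigits 10 (m % 10) := by
  have hne : m / 10 ≠ 0 := by
    intro hc; have := Nat.div_eq_zero_iff.mp hc; omega
  have h1 : Nat.toDigits 10 m = Nat.toDigitsCore 10 m (m / 10) [Nat.digitChar (m % 10)] := by
    simp only [Nat.toDigits, Nat.toDigitsCore, hne, if_false]
  rw [h1, pvToDigitsCore_append m (m / 10) _]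
  have h2 : Nat.toDigitsCore 10 m (m / 10) [] = Nat.toDigits 10 (m / 10) := by
    unfold Nat.toDigits
    exact pvToDigitsCore_fuel (m / 10) m (m / 10 + 1) (Nat.div_lt_self (by omega) (by norm_num))
      (by omega)
  have h3 : Nat.toDigits 10 (m % 10) = [Nat.digitChar (m % 10)] := by
    have hlt : m % 10 < 10 := Nat.mod_lt _ (by norm_num)
    simp only [Nat.toDigits, Nat.toDigitsCore, Nat.div_eq_of_lt hlt, if_true,
      Nat.mod_eq_of_lt hlt]
  rw [h2, h3]

theorem pvToDigits_lt10 (m : Nat) (h : m < 10) : Nat.toDigits 10 m = [Nat.digitChar m] := by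
  simp only [Nat.toDigits, Nat.toDigitsCore, Nat.div_eq_of_lt h, if_true, Nat.mod_eq_of_lt h]

theorem pvToChars_nonneg (m : Nat) : PySem.Int.toChars (m : Int) = Nat.toDigits 10 m := by
  unfold PySem.Int.toChars
  simp

-- str(m) of a positive number starts with a nonzero digit
theorem pvToDigits_pos (m : Nat) (hm : 0 < m) :
    ∃ c cs, Nat.toDigits 10 m = c :: cs ∧ c ≠ '0' := by
  induction m using Nat.strong_induction_on with
  | _ m ih =>
    by_cases h : m < 10
    · refine ⟨Nat.digitChar m, [], pvToDigits_lt10 m h, ?_⟩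
      interval_cases m <;> decide
    · obtain ⟨c, cs, hc, hne⟩ := ih (m / 10) (Nat.div_lt_self (by omega) (by norm_num))
        (by omega)
      refine ⟨c, cs ++ Nat.toDigits 10 (m % 10), ?_, hne⟩
      rw [pvToDigits_split m (by omega), hc]
      simp

-- ---- the carry chain produces leading zeros followed by str(value) ----

theorem pvNum_nonneg (sums : List Int) (h : ∀ s ∈ sums, 0 ≤ s) : 0 ≤ pvNum sums := by
  induction sums with
  | nil => simp [pvNum]
  | cons s l ih =>
    have h1 := h s (by simp)
    have h2 := ih (fun x hx => h x (by simp [hx]))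
    simp only [pvNum]
    omega

theorem pvChainA_digits (sums : List Int) :
    ∀ (r : Int) (acc : List Char), (∀ s ∈ sums, 0 ≤ s) → 0 ≤ r →
      ∃ k, pvChainA sums r acc =
        List.replicate k '0' ++
          (if 0 < r + pvNum sums then Nat.toDigits 10 (r + pvNum sums).toNat else []) ++ acc := by
  induction sums with
  | nil =>
    intro r acc _ hr
    obtain ⟨m, rfl⟩ : ∃ m : Nat, r = (m : Int) := ⟨r.toNat, by omega⟩
    simp only [pvChainA, pvNum, add_zero]
    have h10 : ((10 : Nat) : Int) = (10 : Int) := by norm_num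
    have hfd : PySem.Int.floordiv (m : Int) 10 = ((m / 10 : Nat) : Int) := by
      rw [← h10]; exact PySem.Int.floordiv_natCast m 10
    have hmd : PySem.Int.mod (m : Int) 10 = ((m % 10 : Nat) : Int) := by
      rw [← h10]; exact PySem.Int.mod_natCast m 10
    rcases Nat.eq_zero_or_pos m with rfl | hm
    · refine ⟨1, ?_⟩
      rw [hfd, hmd]
      have e1 : PySem.Int.toChars (((0 % 10 : Nat) : Nat) : Int) = ['0'] := by decide
      rw [e1]
      simp
    · by_cases hlt : m < 10
      · refine ⟨0, ?_⟩
        have hd0 : m / 10 = 0 := Nat.div_eq_of_lt hlt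
        have hm2 : m % 10 = m := Nat.mod_eq_of_lt hlt
        rw [hfd, hmd, hd0, hm2,
          if_pos (show (0 : Int) < (m : Int) by exact_mod_cast hm)]
        simp [pvToChars_nonneg]
      · refine ⟨0, ?_⟩
        have hdne : m / 10 ≠ 0 := by omega
        rw [hfd, hmd, if_pos (show ((m / 10 : Nat) : Int) ≠ 0 from Nat.cast_ne_zero.mpr hdne),
          if_pos (show (0 : Int) < (m : Int) by exact_mod_cast (show 0 < m by omega)),
          pvToChars_nonneg, pvToChars_nonneg, ← pvToDigits_split m (by omega)]
        simp
  | cons s l ih =>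
    intro r acc hs hr
    simp only [pvChainA, pvNum]
    have hs0 := hs s (by simp)
    have hrs : (0 : Int) ≤ r + s := by omega
    have hfd : PySem.Int.floordiv (r + s) 10 = (r + s) / 10 :=
      PySem.Int.floordiv_eq_ediv_of_pos (by norm_num)
    have hmd : PySem.Int.mod (r + s) 10 = (r + s) % 10 :=
      PySem.Int.mod_eq_emod_of_pos (by norm_num)
    have hr' : 0 ≤ (r + s) / 10 := Int.ediv_nonneg hrs (by norm_num)
    have hNl := pvNum_nonneg l (fun x hx => hs x (by simp [hx]))
    obtain ⟨k, hk⟩ := ih ((r + s) / 10)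
      (PySem.Int.toChars ((r + s) % 10) ++ acc) (fun x hx => hs x (by simp [hx])) hr'
    set N' : Int := (r + s) / 10 + pvNum l with hN'
    set d : Int := (r + s) % 10 with hdd
    have hd0 : 0 ≤ d := by rw [hdd]; exact Int.emod_nonneg _ (by norm_num)
    have hd10 : d < 10 := by rw [hdd]; exact Int.emod_lt_of_pos _ (by norm_num)
    have hdm : 10 * ((r + s) / 10) + d = r + s := by rw [hdd]; omega
    have hN : r + (s + 10 * pvNum l) = 10 * N' + d := by rw [hN', hdd]; omega
    have hN'0 : 0 ≤ N' := by rw [hN']; omega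
    clear_value N' d
    rw [hfd, hmd, hk]
    have hchars : PySem.Int.toChars d = [Nat.digitChar d.toNat] := by
      obtain ⟨e, he⟩ : ∃ e : Nat, d = (e : Int) := ⟨d.toNat, by omega⟩
      rw [he, pvToChars_nonneg, pvToDigits_lt10 e (by omega)]
      simp
    rcases eq_or_lt_of_le hN'0 with hz | hpos
    · -- no carry flows left: the emitted digit is the whole value
      rcases eq_or_lt_of_le hd0 with hz2 | hd1
      · refine ⟨k + 1, ?_⟩
        rw [if_neg (show ¬ 0 < N' by omega),
          if_neg (show ¬ 0 < r + (s + 10 * pvNum l) by omega), hchars]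
        have hdc : Nat.digitChar d.toNat = '0' := by
          have he : d.toNat = 0 := by omega
          rw [he]
          rfl
        rw [hdc, List.replicate_succ']
        simp
      · refine ⟨k, ?_⟩
        rw [if_neg (show ¬ 0 < N' by omega),
          if_pos (show 0 < r + (s + 10 * pvNum l) by omega), hchars]
        have h2 : (r + (s + 10 * pvNum l)).toNat = d.toNat := by omega
        rw [h2, pvToDigits_lt10 d.toNat (by omega)]
        simp
    · -- the value accumulated so far is positive: peel its last decimal digit
      refine ⟨k, ?_⟩
      rw [if_pos (show 0 < N' by omega),
        if_pos (show 0 < r + (s + 10 * pvNum l) by omega), hchars]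
      have hsplit : Nat.toDigits 10 (r + (s + 10 * pvNum l)).toNat =
          Nat.toDigits 10 N'.toNat ++ [Nat.digitChar d.toNat] := by
        have hm10 : 10 ≤ (r + (s + 10 * pvNum l)).toNat := by omega
        rw [pvToDigits_split _ hm10]
        have h1 : (r + (s + 10 * pvNum l)).toNat / 10 = N'.toNat := by omega
        have h2 : (r + (s + 10 * pvNum l)).toNat % 10 = d.toNat := by omega
        rw [h1, h2, pvToDigits_lt10 d.toNat (by omega)]
      rw [hsplit]
      simp

-- ---- B-side: the total equals the number the column sums denote ----

theorem pvNum_add (l : List Nat) (f g : Nat → Int) :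
    pvNum (l.map (fun j => f j + g j)) = pvNum (l.map f) + pvNum (l.map g) := by
  induction l with
  | nil => simp [pvNum]
  | cons a t ih =>
    simp only [List.map_cons, pvNum, ih]
    ring

theorem pvNum_zero (l : List Nat) : pvNum (l.map (fun _ => (0 : Int))) = 0 := by
  induction l with
  | nil => simp [pvNum]
  | cons a t ih =>
    simp only [List.map_cons, pvNum]
    rw [ih]
    norm_num

-- Horner evaluated left-to-right = the digit positions read right-to-left
theorem pvHorner_rev (L : List Char) :
    ∀ K, L.length ≤ K →
      pvNum ((List.range K).map (fun j => pvDigitInt (L.getD j '0'))) =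
        L.foldr (fun c a => pvDigitInt c + 10 * a) 0 := by
  induction L with
  | nil =>
    intro K _
    have : (List.range K).map (fun j => pvDigitInt (([] : List Char).getD j '0')) =
        (List.range K).map (fun _ => (0 : Int)) :=
      List.map_congr_left (fun j _ => by simp [pvDigitInt_zeroChar])
    rw [this, pvNum_zero]
    simp
  | cons c M ih =>
    intro K hK
    obtain ⟨K', rfl⟩ : ∃ K', K = K' + 1 := ⟨K - 1, by simp at hK; omega⟩
    rw [List.range_succ_eq_map, List.map_cons, List.map_map]
    simp only [pvNum, List.getD_cons_zero, List.foldr_cons]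
    have hm : (List.range K').map ((fun j => pvDigitInt ((c :: M).getD j '0')) ∘ Nat.succ) =
        (List.range K').map (fun j => pvDigitInt (M.getD j '0')) :=
      List.map_congr_left (fun j _ => by simp)
    rw [hm, ih K' (by simp at hK; omega)]

theorem pvHorner_eq (s : String) :
    ∀ K, s.toList.length ≤ K →
      pvNum ((List.range K).map (fun j => pvDigAt s j)) = pvHorner s := by
  intro K hK
  unfold pvDigAt pvHorner
  rw [pvHorner_rev s.toList.reverse K (by simpa using hK), List.foldr_reverse]
  have : (fun (a : Int) (c : Char) => pvDigitInt c + 10 * a) =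
      (fun (value : Int) (ch : Char) => value * 10 + pvDigitInt ch) := by
    funext a c; ring
  rw [this]

theorem pvFoldl_total (ns : List String) :
    ∀ r : Int, ns.foldl (fun total s => total + pvHorner s) r =
      r + (ns.map pvHorner).sum := by
  induction ns with
  | nil => simp
  | cons s t ih =>
    intro r
    simp only [List.foldl_cons, List.map_cons, List.sum_cons, ih]
    ring

theorem pvNum_pvS (ns : List String) :
    ∀ K, pvMaxLen ns ≤ K →
      pvNum ((List.range K).map (pvS ns)) = (ns.map pvHorner).sum := by
  induction ns with
  | nil =>
    intro K _
    have : (List.range K).map (pvS []) = (List.range K).map (fun _ => (0 : Int)) :=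
      List.map_congr_left (fun j _ => by simp [pvS])
    rw [this, pvNum_zero]
    simp
  | cons s t ih =>
    intro K hK
    have hstep : pvMaxLen (s :: t) = max s.toList.length (pvMaxLen t) := rfl
    have hsplit : (List.range K).map (pvS (s :: t)) =
        (List.range K).map (fun j => pvDigAt s j + pvS t j) :=
      List.map_congr_left (fun j _ => by simp [pvS])
    rw [hsplit, pvNum_add, pvHorner_eq s K (by omega), ih K (by omega)]
    simp

-- ---- nonnegativity on Pre_ ----

theorem pvDigitInt_nonneg (c : Char) (h : PySem.Chars.isdigit c = true) : 0 ≤ pvDigitInt c := by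
  simp [PySem.Chars.isdigit, Char.le_def] at h
  obtain ⟨h1, h2⟩ := h
  have h3 : (48 : Nat) ≤ c.val.toNat := by exact_mod_cast h1
  have h4 : c.toNat = c.val.toNat := rfl
  unfold pvDigitInt
  omega

theorem pvS_nonneg (ns : List String) (hpre : Pre_calculate_large_sum ns) (j : Nat) :
    0 ≤ pvS ns j := by
  have hpre' : ∀ s ∈ ns, ∀ c ∈ s.toList, PySem.Chars.isdigit c = true := by
    intro s hs c hc
    have h1 := List.all_eq_true.mp hpre s hs
    exact List.all_eq_true.mp h1 c hc
  apply List.sum_nonneg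
  intro x hx
  rw [List.mem_map] at hx
  obtain ⟨s, hs, rfl⟩ := hx
  unfold pvDigAt
  by_cases hlen : j < s.toList.reverse.length
  · apply pvDigitInt_nonneg
    apply hpre' s hs
    rw [List.getD_eq_getElem _ _ hlen]
    exact List.mem_reverse.mp (List.getElem_mem hlen)
  · rw [List.getD_eq_default _ _ (by omega)]
    rw [pvDigitInt_zeroChar]

-- dropping leading zeros past the padding
theorem pvDropZeros (k : Nat) (L : List Char) :
    (List.replicate k '0' ++ L).dropWhile (fun c => c == '0') =
      L.dropWhile (fun c => c == '0') := by
  induction k with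
  | zero => simp
  | succ k ih =>
    rw [List.replicate_succ, List.cons_append, List.dropWhile_cons_of_pos (by decide)]
    exact ih

-- ===== VERDICT (by name: the statement is the Claim_ definition above) =====
theorem calculate_large_sum_spec : Claim_equal_calculate_large_sum := by
  intro ns _ hpre
  unfold Spec_calculate_large_sum
  have hnn : ∀ s ∈ (List.range (pvMaxLen ns)).map (pvS ns), (0:Int) ≤ s := by
    intro s hs
    rw [List.mem_map] at hs
    obtain ⟨j, _, rfl⟩ := hs
    exact pvS_nonneg ns hpre j
  obtain ⟨k, hk⟩ := pvChainA_digits ((List.range (pvMaxLen ns)).map (pvS ns)) 0 [] hnn le_rfl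
  have hN0 : 0 ≤ pvNum ((List.range (pvMaxLen ns)).map (pvS ns)) := pvNum_nonneg _ hnn
  have hB : calculate_large_sum_alt ns =
      PySem.Int.toStr (pvNum ((List.range (pvMaxLen ns)).map (pvS ns))) := by
    unfold calculate_large_sum_alt
    rw [pvFoldl_total ns 0, pvNum_pvS ns (pvMaxLen ns) le_rfl]
    norm_num
  simp only [zero_add, List.append_nil] at hk
  rw [pvA_value, hB, hk]
  rcases eq_or_lt_of_le hN0 with hz | hpos
  · rw [← hz]
    have h1 : (List.replicate k '0' ++
        (if (0:Int) < 0 then Nat.toDigits 10 (0:Int).toNat else [])).dropWhile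
          (fun c => c == '0') = [] := by
      rw [if_neg (lt_irrefl 0), pvDropZeros]
      rfl
    simp only [h1]
    decide
  · obtain ⟨c, cs, hc, hne⟩ := pvToDigits_pos
      (pvNum ((List.range (pvMaxLen ns)).map (pvS ns))).toNat (by omega)
    rw [if_pos hpos]
    have hstr : (List.replicate k '0' ++
        Nat.toDigits 10 (pvNum ((List.range (pvMaxLen ns)).map (pvS ns))).toNat).dropWhile
          (fun c => c == '0') = c :: cs := by
      rw [hc, pvDropZeros, List.dropWhile_cons_of_neg (by simpa using hne)]
    simp only [hstr, List.isEmpty_cons, Bool.false_eq_true, if_false]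
    have hchars : PySem.Int.toChars (pvNum ((List.range (pvMaxLen ns)).map (pvS ns))) = c :: cs := by
      obtain ⟨e, he⟩ : ∃ e : Nat,
          pvNum ((List.range (pvMaxLen ns)).map (pvS ns)) = (e : Int) :=
        ⟨(pvNum ((List.range (pvMaxLen ns)).map (pvS ns))).toNat, by omega⟩
      rw [he, pvToChars_nonneg]
      rw [he] at hc
      simpa using hc
    have htl : (PySem.Int.toStr (pvNum ((List.range (pvMaxLen ns)).map (pvS ns)))).toList =
        c :: cs := by
      rw [PySem.Int.toList_toStr, hchars]
    rw [← htl]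
    exact String.ofList_toList
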